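-- pv_equiv track=rewrite | github.com/MatejCreator/work_folder | Sorting Visualizer/sorting_show.py | quadratic
-- ===== SOURCE A (Python) =====
-- from typing import Any, Generator
--
-- def quadratic(n: int) -> Generator[list[int], None, None]:
--     arr = [1 for _ in range(n)]
--     yield arr[:]
--
--     for i in range(1, len(arr)):
--         arr[i] = i ** 2
--         for j in range(i + 1, len(arr)):
--             arr[j] = arr[i]
--         yield arr[:]
-- ===== SOURCE B (Python) =====
-- def quadratic(n):
--     yield [1] * n
--     for i in range(1, n):
--         yield [1] + [k * k for k in range(1, i + 1)] + [i * i] * (n - 1 - i)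
-- ===== Notes on version B (the rewrite author's own statement) =====
-- stated objective: simpler
-- what changed: A carries a mutable array across iterations, updating arr[i] in place and refilling the whole tail with an inner loop before copying it out; B keeps no state and builds each snapshot independently from the closed form [1] + [k*k for k in range(1,i+1)] + [i*i]*(n-1-i).
import Mathlib
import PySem

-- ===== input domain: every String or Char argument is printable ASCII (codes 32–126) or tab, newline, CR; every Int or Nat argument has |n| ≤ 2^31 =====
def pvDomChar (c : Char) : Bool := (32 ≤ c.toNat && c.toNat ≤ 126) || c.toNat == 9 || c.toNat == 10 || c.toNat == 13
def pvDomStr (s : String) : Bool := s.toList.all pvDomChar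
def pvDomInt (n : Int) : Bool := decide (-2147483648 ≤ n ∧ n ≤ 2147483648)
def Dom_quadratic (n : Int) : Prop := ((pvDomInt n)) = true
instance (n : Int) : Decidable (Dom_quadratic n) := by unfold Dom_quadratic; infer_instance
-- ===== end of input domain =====

-- B replaces A's carried mutable array (in-place update + tail-refill inner loop) by a
-- stateless closed-form construction of each snapshot; objective: simpler.

-- ===== PORT A =====
-- literal transliteration of A: arr starts all 1s; each outer step sets arr[i] = i**2,
-- the inner loop copies arr[i] into every later cell, and a copy of arr is emitted.
def quadratic (n : Int) : List (List Int) :=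
  let arr : List Int := (PySem.List.pyRange 0 n 1).map (fun _ => (1 : Int))
  let res :=
    (PySem.List.pyRange 1 (arr.length : Int) 1).foldl
      (fun (st : List (List Int) × List Int) i =>
        let a1 := PySem.List.pySetD st.2 i (i ^ 2)
        let a2 :=
          (PySem.List.pyRange (i + 1) (a1.length : Int) 1).foldl
            (fun b j => PySem.List.pySetD b j (PySem.List.pyGetD b i 0)) a1
        (st.1 ++ [a2], a2))
      ([arr], arr)
  res.1

-- ===== PORT B =====
-- literal transliteration of B: yield [1]*n, then for each i a fresh row
-- [1] + [k*k for k in range(1, i+1)] + [i*i]*(n-1-i).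
def quadratic_alt (n : Int) : List (List Int) :=
  PySem.List.pyRepeat [(1 : Int)] n ::
    (PySem.List.pyRange 1 n 1).map (fun i =>
      (1 : Int) :: ((PySem.List.pyRange 1 (i + 1) 1).map (fun k => k * k)
        ++ PySem.List.pyRepeat [i * i] (n - 1 - i)))

-- ===== PRECONDITION & SPEC =====
def Spec_quadratic (n : Int) (out : List (List Int)) : Prop := out = quadratic_alt n
instance (n : Int) (out : List (List Int)) : Decidable (Spec_quadratic n out) := by unfold Spec_quadratic; infer_instance

-- ===== CLAIM (what is proved, stated in full; the proofs are below) =====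
def Claim_equal_quadratic : Prop := ∀ (n : Int), Dom_quadratic n → Spec_quadratic n (quadratic n)

-- ===== LEMMAS AND PROOFS =====
def pvRow (n i c : Int) : List Int :=
  (1 : Int) :: ((PySem.List.pyRange 1 (i + 1) 1).map (fun k => k * k)
    ++ List.replicate (n - 1 - i).toNat c)

lemma pvGetD_append_left (p q : List Int) (i : Nat) (h : i < p.length) :
    PySem.List.pyGetD (p ++ q) (i : Int) 0 = PySem.List.pyGetD p (i : Int) 0 := by
  simp [PySem.List.pyGetD_natCast, List.getD, List.getElem?_append_left h]

lemma pvFill (i : Nat) : ∀ (r : Nat) (p : List Int) (c : Int), i < p.length →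
    (PySem.List.pyRange (p.length : Int) ((p.length + r : Nat) : Int) 1).foldl
      (fun b j => PySem.List.pySetD b j (PySem.List.pyGetD b (i : Int) 0))
      (p ++ List.replicate r c)
    = p ++ List.replicate r (PySem.List.pyGetD p (i : Int) 0) := by
  intro r
  induction r with
  | zero => intro p c h; simp [PySem.List.pyRange_one_eq_nil]
  | succ r ih =>
    intro p c h
    rw [PySem.List.pyRange_one_cons (by push_cast; omega)]
    simp only [List.foldl_cons]
    rw [pvGetD_append_left _ _ i h]
    have hset : PySem.List.pySetD (p ++ List.replicate (r+1) c) ((p.length : Nat) : Int)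
        (PySem.List.pyGetD p (i : Int) 0)
        = (p ++ [PySem.List.pyGetD p (i : Int) 0]) ++ List.replicate r c := by
      rw [PySem.List.pySetD_natCast]
      rw [List.set_append_right _ _ (le_refl _)]
      simp [List.replicate_succ]
    rw [hset]
    have hlen : ((p.length + (r+1) : Nat) : Int) = (((p ++ [PySem.List.pyGetD p (i : Int) 0]).length + r : Nat) : Int) := by
      simp; omega
    have hstart : ((p.length : Nat) : Int) + 1 = (((p ++ [PySem.List.pyGetD p (i : Int) 0]).length : Nat) : Int) := by
      simp
    rw [hlen, hstart, ih _ c (by simp; omega)]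
    rw [pvGetD_append_left _ _ i h]
    simp [List.replicate_succ]

lemma pvA1 (n i c : Int) (h1 : 1 ≤ i) (h2 : i < n) :
    PySem.List.pySetD (pvRow n (i - 1) c) i (i ^ 2) = pvRow n i c := by
  rw [PySem.List.pySetD_of_nonneg _ _ (by omega)]
  unfold pvRow
  have hQ : PySem.List.pyRange 1 (i + 1) 1 = PySem.List.pyRange 1 i 1 ++ [i] :=
    PySem.List.pyRange_one_succ_right (by omega)
  have hrep : (n - 1 - (i-1)).toNat = (n - 1 - i).toNat + 1 := by omega
  have hi : i.toNat = ((PySem.List.pyRange 1 (i - 1 + 1) 1).map (fun k => k*k)).length + 1 := by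
    simp [PySem.List.length_pyRange_one]; omega
  rw [hi, List.set_cons_succ, List.set_append_right _ _ (le_refl _), hrep]
  simp only [Nat.sub_self, List.replicate_succ, List.set_cons_zero]
  have h3 : i - 1 + 1 = i := by omega
  rw [h3, hQ]
  simp [sq, List.append_assoc]

lemma pvFill' (i : Int) (hi : 0 ≤ i) (r : Nat) (p : List Int) (c : Int)
    (h : i.toNat < p.length) :
    (PySem.List.pyRange (p.length : Int) ((p.length + r : Nat) : Int) 1).foldl
      (fun b j => PySem.List.pySetD b j (PySem.List.pyGetD b i 0))
      (p ++ List.replicate r c)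
    = p ++ List.replicate r (PySem.List.pyGetD p i 0) := by
  have h2 := pvFill i.toNat r p c h
  rwa [Int.toNat_of_nonneg hi] at h2

lemma pvStep (n i c : Int) (h1 : 1 ≤ i) (h2 : i < n) :
    (let a1 := PySem.List.pySetD (pvRow n (i - 1) c) i (i ^ 2)
     (PySem.List.pyRange (i + 1) (a1.length : Int) 1).foldl
       (fun b j => PySem.List.pySetD b j (PySem.List.pyGetD b i 0)) a1)
    = pvRow n i (i * i) := by
  simp only [pvA1 n i c h1 h2]
  have hrow : pvRow n i c
      = ((1 : Int) :: (PySem.List.pyRange 1 (i + 1) 1).map (fun k => k * k))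
        ++ List.replicate (n - 1 - i).toNat c := by
    simp [pvRow]
  have hplen : ((1 : Int) :: (PySem.List.pyRange 1 (i + 1) 1).map (fun k => k * k)).length
      = i.toNat + 1 := by
    simp [PySem.List.length_pyRange_one]
  have hstart : i + 1
      = ((((1 : Int) :: (PySem.List.pyRange 1 (i + 1) 1).map (fun k => k * k)).length : Nat) : Int) := by
    rw [hplen]; omega
  have hblen : ((pvRow n i c).length : Int)
      = ((((1 : Int) :: (PySem.List.pyRange 1 (i + 1) 1).map (fun k => k * k)).length
          + (n - 1 - i).toNat : Nat) : Int) := by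
    rw [hrow]; simp; omega
  have hval : PySem.List.pyGetD
      ((1 : Int) :: (PySem.List.pyRange 1 (i + 1) 1).map (fun k => k * k)) i 0
      = i * i := by
    have hsplit : PySem.List.pyRange 1 (i + 1) 1 = PySem.List.pyRange 1 i 1 ++ [i] :=
      PySem.List.pyRange_one_succ_right (by omega)
    have hl : ((1 : Int) :: (PySem.List.pyRange 1 i 1).map (fun k => k * k)).length = i.toNat := by
      simp [PySem.List.length_pyRange_one]; omega
    rw [hsplit]
    simp only [List.map_append, List.map_cons, List.map_nil]
    rw [show ((1 : Int) :: ((PySem.List.pyRange 1 i 1).map (fun k => k * k) ++ [i * i]))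
        = (((1 : Int) :: (PySem.List.pyRange 1 i 1).map (fun k => k * k)) ++ [i * i]) by simp]
    rw [PySem.List.pyGetD_eq_getElem _ _ (by omega) (by simp; omega)]
    exact List.getElem_concat_length hl.symm _
  rw [hstart, hblen, hrow]
  rw [pvFill' i (by omega) _ _ _ (by rw [hplen]; omega)]
  rw [hval]
  simp [pvRow]

lemma pvOuter (n : Int) : ∀ (r : Nat) (i : Int), 1 ≤ i → n - i = r →
    ∀ (acc : List (List Int)) (c : Int),
    ((PySem.List.pyRange i n 1).foldl
      (fun (st : List (List Int) × List Int) i =>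
        let a1 := PySem.List.pySetD st.2 i (i ^ 2)
        let a2 :=
          (PySem.List.pyRange (i + 1) (a1.length : Int) 1).foldl
            (fun b j => PySem.List.pySetD b j (PySem.List.pyGetD b i 0)) a1
        (st.1 ++ [a2], a2))
      (acc, pvRow n (i - 1) c)).1
    = acc ++ (PySem.List.pyRange i n 1).map (fun j => pvRow n j (j * j)) := by
  intro r
  induction r with
  | zero =>
    intro i h1 hr acc c
    rw [PySem.List.pyRange_one_eq_nil (by omega)]
    simp
  | succ r ih =>
    intro i h1 hr acc c
    have hlt : i < n := by omega
    rw [PySem.List.pyRange_one_cons hlt]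
    simp only [List.foldl_cons, List.map_cons]
    have hs : List.foldl (fun b j => PySem.List.pySetD b j (PySem.List.pyGetD b i 0))
        (PySem.List.pySetD (pvRow n (i - 1) c) i (i ^ 2))
        (PySem.List.pyRange (i + 1) ((PySem.List.pySetD (pvRow n (i - 1) c) i (i ^ 2)).length : Int) 1)
        = pvRow n i (i * i) := pvStep n i c h1 hlt
    rw [hs]
    have hih := ih (i + 1) (by omega) (by omega) (acc ++ [pvRow n i (i * i)]) (i * i)
    simp only [add_sub_cancel_right] at hih
    rw [hih]
    simp

-- ===== VERDICT (by name: the statement is the Claim_ definition above) =====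
theorem quadratic_spec : Claim_equal_quadratic := by
  intro n _
  unfold Spec_quadratic quadratic quadratic_alt
  by_cases hn : n ≤ 0
  · have e1 : PySem.List.pyRange 0 n 1 = [] := PySem.List.pyRange_one_eq_nil (by omega)
    have e2 : PySem.List.pyRange 1 n 1 = [] := PySem.List.pyRange_one_eq_nil (by omega)
    have e3 : n.toNat = 0 := by omega
    rw [e1, e2]
    simp [PySem.List.pyRepeat_singleton, e3]
  · have hn1 : 1 ≤ n := by omega
    have harr : (PySem.List.pyRange 0 n 1).map (fun _ => (1 : Int)) = pvRow n (1 - 1) 1 := by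
      have h1 : (PySem.List.pyRange 0 n 1).map (fun _ => (1 : Int))
          = List.replicate n.toNat 1 := by
        rw [List.eq_replicate_iff]
        constructor
        · simp [PySem.List.length_pyRange_one]
        · intro b hb
          simp only [List.mem_map] at hb
          obtain ⟨_, _, hb⟩ := hb
          omega
      have h2 : PySem.List.pyRange 1 (1 - 1 + 1) 1 = [] :=
        PySem.List.pyRange_one_eq_nil (by omega)
      have h3 : n.toNat = (n - 1 - (1 - 1)).toNat + 1 := by omega
      rw [h1, pvRow, h2, h3, List.replicate_succ]
      simp
    have hlen : (((pvRow n (1 - 1) 1).length : Nat) : Int) = n := by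
      simp [pvRow]; omega
    simp only [harr, hlen]
    rw [pvOuter n (n - 1).toNat 1 (by omega) (by omega) [pvRow n (1 - 1) 1] 1]
    have hrep : pvRow n (1 - 1) 1 = PySem.List.pyRepeat [(1 : Int)] n := by
      rw [PySem.List.pyRepeat_singleton, pvRow]
      rw [PySem.List.pyRange_one_eq_nil (by omega : (1 : Int) - 1 + 1 ≤ 1)]
      rw [show n.toNat = (n - 1 - (1 - 1)).toNat + 1 by omega, List.replicate_succ]
      simp
    rw [hrep]
    simp only [PySem.List.pyRepeat_singleton, pvRow, List.cons_append, List.nil_append]
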